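-- pv_equiv track=rewrite | github.com/KhanhNguyen4999/VietNam_accent_marks | FinalProject/1712525_1712531.py | clean_doc_level_letter
-- ===== SOURCE A (Python) =====
-- def clean_doc_level_letter(s):
--   """
--   Tách câu s thành từng chữ (tách theo khoảng trắng)
--   Đồng thời, xóa đi các kí tự không là chữ cái latin
--   trong chuỗi s.
--   --- INPUT ---
--   s {string}: chuỗi cần tách
--
--   --- OUTPUT ---
--   {list} : danh sách các chữ trong chuỗi s.
--   """
--   new_s=[]
--
--   for w in s.lower().split():
--     w_iter = list(w)
--     w_remove = w_iter.copy()
--     for c in w_iter :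
--       if not c.isalpha():
--         w_remove.remove(c)
--     if w_remove:
--       new_s.append(''.join(w_remove))
--
--   return new_s
-- ===== SOURCE B (Python) =====
-- def clean_doc_level_letter(s):
--   result = []
--   buf = []
--   for c in s.lower():
--     if c.isspace():
--       if buf:
--         result.append(''.join(buf))
--       buf = []
--     elif c.isalpha():
--       buf.append(c)
--   if buf:
--     result.append(''.join(buf))
--   return result
-- ===== Notes on version B (the rewrite author's own statement) =====
-- stated objective: alternative
-- what changed: Replaces split() plus a per-word remove() loop with one character scan that buffers alphabetic chars and flushes the buffer on whitespace.
import Mathlib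
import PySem

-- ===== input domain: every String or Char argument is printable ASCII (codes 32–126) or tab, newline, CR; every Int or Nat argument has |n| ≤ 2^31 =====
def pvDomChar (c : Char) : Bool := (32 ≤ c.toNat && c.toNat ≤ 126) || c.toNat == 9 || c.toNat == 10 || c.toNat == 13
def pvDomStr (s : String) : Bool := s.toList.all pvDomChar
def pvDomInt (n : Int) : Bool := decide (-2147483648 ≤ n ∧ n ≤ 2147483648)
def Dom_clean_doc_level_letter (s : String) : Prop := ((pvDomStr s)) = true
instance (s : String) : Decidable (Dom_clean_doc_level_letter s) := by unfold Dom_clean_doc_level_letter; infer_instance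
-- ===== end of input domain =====

-- B replaces split() plus a per-word remove() loop with one character scan that
-- buffers alphabetic chars and flushes the buffer on whitespace (objective: alternative).

-- ===== PORT A =====
-- `w_remove.remove(c)` never raises here (every iterated c is still present), so the
-- `none` branch of `remove?` (Python's ValueError) is unreachable; `.getD r` covers it.
def clean_doc_level_letter (s : String) : List String :=
  (PySem.Str.split₀ (PySem.Str.lower s)).foldl (fun new_s w =>
    let w_iter := w.toList
    let w_remove := w_iter.foldl
      (fun r c => if ¬ PySem.Chars.isalpha c then (PySem.List.remove? r c).getD r else r) w_iter
    if w_remove.isEmpty then new_s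
    else new_s ++ [String.ofList (PySem.Chars.join [] (w_remove.map (fun c => [c])))]) []

-- ===== PORT B =====
def stepB (st : List String × List Char) (c : Char) : List String × List Char :=
  if PySem.Chars.isspace c then
    ((if st.2.isEmpty then st.1
      else st.1 ++ [String.ofList (PySem.Chars.join [] (st.2.map (fun c => [c])))]), [])
  else if PySem.Chars.isalpha c then (st.1, st.2 ++ [c])
  else st

def clean_doc_level_letter_alt (s : String) : List String :=
  let fin := (PySem.Str.lower s).toList.foldl stepB ([], [])
  if fin.2.isEmpty then fin.1
  else fin.1 ++ [String.ofList (PySem.Chars.join [] (fin.2.map (fun c => [c])))]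

-- ===== PRECONDITION & SPEC =====
def Spec_clean_doc_level_letter (s : String) (out : List String) : Prop := out = clean_doc_level_letter_alt s
instance (s : String) (out : List String) : Decidable (Spec_clean_doc_level_letter s out) := by unfold Spec_clean_doc_level_letter; infer_instance

-- ===== CLAIM (what is proved, stated in full; the proofs are below) =====
def Claim_equal_clean_doc_level_letter : Prop := ∀ (s : String), Dom_clean_doc_level_letter s → Spec_clean_doc_level_letter s (clean_doc_level_letter s)

-- ===== LEMMAS AND PROOFS =====

-- the common value both programs compute: per word, keep the alphabetic chars, drop empty results
def clean (ws : List (List Char)) : List String :=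
  ws.filterMap (fun w =>
    let v := w.filter (fun c => PySem.Chars.isalpha c)
    if v.isEmpty then none else some (String.ofList v))

lemma clean_nil : clean [] = [] := rfl

lemma clean_cons (w : List Char) (ws : List (List Char)) :
    clean (w :: ws)
      = (if (w.filter (fun c => PySem.Chars.isalpha c)).isEmpty then []
         else [String.ofList (w.filter (fun c => PySem.Chars.isalpha c))]) ++ clean ws := by
  by_cases hv : (w.filter (fun c => PySem.Chars.isalpha c)).isEmpty
  · simp only [clean, List.filterMap_cons, hv, if_pos, if_true, List.nil_append]
  · simp only [clean, List.filterMap_cons, hv, if_false, Bool.false_eq_true,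
      List.singleton_append]

lemma clean_append (a b : List (List Char)) : clean (a ++ b) = clean a ++ clean b := by
  simp [clean]

lemma remove_head (p rest : List Char) (c : Char) (h : ∀ x ∈ p, x ≠ c) :
    PySem.List.remove? (p ++ c :: rest) c = some (p ++ rest) := by
  induction p with
  | nil => simp [PySem.List.remove?, List.idxOf?, List.findIdx?_cons]
  | cons a p ih =>
    have ha : a ≠ c := h a (by simp)
    have ih' := ih (fun x hx => h x (by simp [hx]))
    simp only [PySem.List.remove?, List.idxOf?, List.cons_append, List.findIdx?_cons,
      beq_iff_eq, ha] at ih' ⊢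
    obtain ⟨k, hk, he⟩ := Option.map_eq_some_iff.mp ih'
    simp [hk, List.eraseIdx_cons_succ, he]

-- A's inner remove loop is a filter: invariant over the processed (all-alphabetic) prefix p
lemma innerA (rest p : List Char) (h : ∀ x ∈ p, PySem.Chars.isalpha x = true) :
    rest.foldl (fun r c => if ¬ PySem.Chars.isalpha c then (PySem.List.remove? r c).getD r else r)
      (p ++ rest) = p ++ rest.filter (fun c => PySem.Chars.isalpha c) := by
  induction rest generalizing p with
  | nil => simp
  | cons c rest ih =>
    by_cases hc : PySem.Chars.isalpha c = true
    · have hp : ∀ x ∈ p ++ [c], PySem.Chars.isalpha x = true := by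
        intro x hx
        rcases List.mem_append.mp hx with h' | h'
        · exact h x h'
        · simp at h'; simpa [h'] using hc
      have := ih (p ++ [c]) hp
      simpa [hc, List.append_assoc] using this
    · have hr : PySem.List.remove? (p ++ c :: rest) c = some (p ++ rest) :=
        remove_head p rest c (fun x hx => by intro hxc; exact hc (hxc ▸ h x hx))
      simpa [hc, hr] using ih p h

lemma innerA0 (w : List Char) :
    w.foldl (fun r c => if ¬ PySem.Chars.isalpha c then (PySem.List.remove? r c).getD r else r) w
      = w.filter (fun c => PySem.Chars.isalpha c) :=
  innerA w [] (by simp)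

-- the per-word step of A, after the inner loop is recognised as a filter
def stepA' (new_s : List String) (w : List Char) : List String :=
  if (w.filter (fun c => PySem.Chars.isalpha c)).isEmpty then new_s
  else new_s ++ [String.ofList (w.filter (fun c => PySem.Chars.isalpha c))]

lemma stepA_eq :
    (fun (new_s : List String) (w : String) =>
      let w_iter := w.toList
      let w_remove := w_iter.foldl
        (fun r c => if ¬ PySem.Chars.isalpha c then (PySem.List.remove? r c).getD r else r) w_iter
      if w_remove.isEmpty then new_s
      else new_s ++ [String.ofList (PySem.Chars.join [] (w_remove.map (fun c => [c])))])
    = fun new_s w => stepA' new_s w.toList := by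
  funext new_s w
  simp only [innerA0, PySem.Chars.join_nil_singletons, stepA']

-- A's outer loop builds `clean` of the split words
lemma outerA (ws : List (List Char)) (acc : List String) :
    ws.foldl stepA' acc = acc ++ clean ws := by
  induction ws generalizing acc with
  | nil => simp [clean_nil]
  | cons w ws ih =>
    simp only [List.foldl_cons, clean_cons, stepA']
    by_cases hv : (w.filter (fun c => PySem.Chars.isalpha c)).isEmpty
    · rw [if_pos hv, if_pos hv, ih, List.nil_append]
    · rw [if_neg hv, if_neg hv, ih, List.append_assoc, List.singleton_append]

-- split₀.go accumulates: pull the accumulator out front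
lemma go_acc (rest : List Char) (cur : List Char) (acc : List (List Char)) :
    PySem.Chars.split₀.go rest cur acc = acc.reverse ++ PySem.Chars.split₀.go rest cur [] := by
  induction rest generalizing cur acc with
  | nil => by_cases h : cur.isEmpty <;> simp [PySem.Chars.split₀.go, h]
  | cons c rest ih =>
    by_cases hc : PySem.Chars.isspace c
    · by_cases h : cur.isEmpty
      · simp only [PySem.Chars.split₀.go, hc, h, if_true]
        exact ih [] acc
      · simp only [PySem.Chars.split₀.go, hc, h, if_true, if_false, Bool.false_eq_true]
        rw [ih, ih [] [cur.reverse]]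
        simp
    · simp only [PySem.Chars.split₀.go, hc, Bool.false_eq_true, if_false]
      exact ih (c :: cur) acc

-- B's scan, started with buffer = alphabetic filter of the (reversed) current split₀ word,
-- computes `clean` of the remaining split
lemma scanB (rest : List Char) (cur : List Char) (res : List String) :
    (let fin := rest.foldl stepB (res, cur.reverse.filter (fun c => PySem.Chars.isalpha c))
     if fin.2.isEmpty then fin.1
     else fin.1 ++ [String.ofList (PySem.Chars.join [] (fin.2.map (fun c => [c])))])
    = res ++ clean (PySem.Chars.split₀.go rest cur []) := by
  induction rest generalizing cur res with
  | nil =>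
    simp only [List.foldl_nil]
    by_cases h : cur.isEmpty
    · have hcur : cur = [] := List.isEmpty_iff.mp h
      simp [hcur, PySem.Chars.split₀.go, clean_nil]
    · simp only [PySem.Chars.split₀.go, h, if_false, Bool.false_eq_true, List.reverse_singleton,
        clean_cons, clean_nil, List.append_nil]
      by_cases hf : (cur.reverse.filter (fun c => PySem.Chars.isalpha c)).isEmpty
      · rw [if_pos hf, if_pos hf]
        simp
      · rw [if_neg hf, if_neg hf, PySem.Chars.join_nil_singletons]
  | cons c rest ih =>
    by_cases hc : PySem.Chars.isspace c
    · have hflush : (c :: rest).foldl stepB (res, cur.reverse.filter (fun c => PySem.Chars.isalpha c))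
          = rest.foldl stepB
              ((if (cur.reverse.filter (fun c => PySem.Chars.isalpha c)).isEmpty then res
                else res ++ [String.ofList (cur.reverse.filter (fun c => PySem.Chars.isalpha c))]), []) := by
        by_cases hf : (cur.reverse.filter (fun c => PySem.Chars.isalpha c)).isEmpty
        · simp only [List.foldl_cons, stepB, hc, if_true, hf]
        · simp only [List.foldl_cons, stepB, hc, if_true, hf, if_false, Bool.false_eq_true,
            PySem.Chars.join_nil_singletons]
      have hih := ih []
        ((if (cur.reverse.filter (fun c => PySem.Chars.isalpha c)).isEmpty then res
          else res ++ [String.ofList (cur.reverse.filter (fun c => PySem.Chars.isalpha c))]))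
      simp only [List.reverse_nil, List.filter_nil] at hih
      simp only [hflush, hih]
      by_cases h : cur.isEmpty
      · have hcur : cur = [] := List.isEmpty_iff.mp h
        simp [hcur, PySem.Chars.split₀.go, hc]
      · simp only [PySem.Chars.split₀.go, hc, h, if_true, if_false, Bool.false_eq_true]
        rw [go_acc rest [] [cur.reverse]]
        simp only [List.reverse_cons, List.reverse_nil, List.nil_append, clean_append,
          clean_cons, clean_nil, List.append_nil]
        by_cases hf : (cur.reverse.filter (fun c => PySem.Chars.isalpha c)).isEmpty
        · rw [if_pos hf, if_pos hf]
          simp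
        · rw [if_neg hf, if_neg hf]
          simp [List.append_assoc]
    · have hstep : stepB (res, cur.reverse.filter (fun c => PySem.Chars.isalpha c)) c
          = (res, (c :: cur).reverse.filter (fun c => PySem.Chars.isalpha c)) := by
        by_cases ha : PySem.Chars.isalpha c
        · simp [stepB, hc, ha, List.filter_append]
        · simp [stepB, hc, ha, List.filter_append]
      simp only [List.foldl_cons, hstep]
      rw [ih (c :: cur) res]
      simp only [PySem.Chars.split₀.go, hc, Bool.false_eq_true, if_false]

-- ===== VERDICT (by name: the statement is the Claim_ definition above) =====
theorem clean_doc_level_letter_spec : Claim_equal_clean_doc_level_letter := by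
  intro s _
  unfold Spec_clean_doc_level_letter clean_doc_level_letter clean_doc_level_letter_alt
  rw [stepA_eq, ← List.foldl_map, outerA ((PySem.Str.split₀ (PySem.Str.lower s)).map String.toList) []]
  rw [PySem.Str.split₀_map_toList]
  have hB := scanB (PySem.Str.lower s).toList [] []
  simp only [List.reverse_nil, List.filter_nil] at hB
  simpa [PySem.Chars.split₀] using hB.symm
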